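-- pv_equiv track=rewrite | github.com/harshithapr/POS-Tagger | src/hmmlearn3.py | get_vocab_tags
-- ===== SOURCE A (Python) =====
-- from collections import Counter, defaultdict
--
-- def get_vocab_tags(linestrings):
--     """
--
--     :param linestrings(list of strings):
--     :return:
--     """
--     vocab_set = set()
--     tag_set = set()
--
--     tag_frequency = Counter()  # Dictionary
--     word_tag_frequency = defaultdict(Counter)  # Dictionary of Dictionary
--
--     tag_list=[]
--
--     tag_out_frequency = Counter()  # Dictionary
--     tag_tag_frequency = defaultdict(Counter)  # Dictionary of Dictionary
--
--     for linestring in linestrings: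
--         words = linestring.split(' ')
--         tag_line=[]
--         for word in words:
--             token = word[:-3]
--             tag = word[-2:].upper()
--             vocab_set.add(token)
--             tag_set.add(tag)
--
--             tag_frequency[tag] += 1
--             word_tag_frequency[tag][token] += 1
--
--             tag_line.append(tag)
--         tag_list.append(tag_line)
--
--     for tag_line in tag_list:
--         for index in range(0,len(tag_line)-1):
--             cur_tag = tag_line[index]  # Fetch the current tag
--             next_tag = tag_line[index + 1] # Fetch the next tag
--             if (index == 0):  # Find the transition frequency from the start state
--                 tag_out_frequency['START'] += 1
--                 tag_tag_frequency['START'][cur_tag] += 1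
--             # Transition out frequency of a tag
--             tag_out_frequency[cur_tag] += 1
--             # Transition frequency from previous tag to current tag
--             tag_tag_frequency[cur_tag][next_tag] += 1
--     return (vocab_set, tag_set, tag_frequency, word_tag_frequency, tag_out_frequency, tag_tag_frequency)
-- ===== SOURCE B (Python) =====
-- from collections import Counter, defaultdict
--
-- def get_vocab_tags(linestrings):
--     """Single pass: transition counts are folded into the word loop via a running
--     previous tag, dropping the tag_list intermediate and the second pass."""
--     vocab_set = set()
--     tag_set = set()
--     tag_frequency = Counter()
--     word_tag_frequency = defaultdict(Counter)
--     tag_out_frequency = Counter()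
--     tag_tag_frequency = defaultdict(Counter)
--
--     for linestring in linestrings:
--         prev = None
--         first = True
--         for word in linestring.split(' '):
--             token = word[:-3]
--             tag = word[-2:].upper()
--             vocab_set.add(token)
--             tag_set.add(tag)
--             tag_frequency[tag] += 1
--             word_tag_frequency[tag][token] += 1
--             if prev is not None:
--                 if first:
--                     tag_out_frequency['START'] += 1
--                     tag_tag_frequency['START'][prev] += 1
--                     first = False
--                 tag_out_frequency[prev] += 1
--                 tag_tag_frequency[prev][tag] += 1
--             prev = tag
--     return (vocab_set, tag_set, tag_frequency, word_tag_frequency, tag_out_frequency, tag_tag_frequency)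
-- ===== Notes on version B (the rewrite author's own statement) =====
-- stated objective: simpler
-- what changed: B fuses A's two passes into a single loop over lines/words that keeps a running previous tag and a first-transition flag, updating the transition counters inline and dropping the tag_list intermediate entirely.
import Mathlib
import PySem

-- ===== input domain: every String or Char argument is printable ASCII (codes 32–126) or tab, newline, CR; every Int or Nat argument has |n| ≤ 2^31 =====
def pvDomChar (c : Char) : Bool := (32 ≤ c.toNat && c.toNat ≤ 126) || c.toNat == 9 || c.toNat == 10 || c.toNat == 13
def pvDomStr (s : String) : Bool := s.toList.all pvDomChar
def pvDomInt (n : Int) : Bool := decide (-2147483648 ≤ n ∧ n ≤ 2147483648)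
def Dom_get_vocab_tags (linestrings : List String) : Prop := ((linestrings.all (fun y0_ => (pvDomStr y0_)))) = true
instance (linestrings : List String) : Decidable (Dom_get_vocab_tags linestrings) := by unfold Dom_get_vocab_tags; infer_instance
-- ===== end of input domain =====

-- B fuses A's two passes into one loop with a running previous tag (same value, one pass, no tag_list intermediate; objective: simpler).

-- state abbreviations: (vocab_set, tag_set, tag_frequency, word_tag_frequency) and (tag_out_frequency, tag_tag_frequency)
abbrev PvS1 := PySem.Set String × PySem.Set String × PySem.Dict String Int × PySem.Dict String (PySem.Dict String Int)
abbrev PvS2 := PySem.Dict String Int × PySem.Dict String (PySem.Dict String Int)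

-- ===== PORT A =====
-- body of A's inner word loop (pass 1): updates the four tables and appends the tag to tag_line
def pvA_word (st : PvS1 × List String) (word : String) : PvS1 × List String :=
  let token := PySem.Str.slice word none (some (-3))
  let tag := PySem.Str.upper (PySem.Str.slice word (some (-2)) none)
  ((PySem.Set.add st.1.1 token, PySem.Set.add st.1.2.1 tag,
    (st.1.2.2.1).insert tag ((st.1.2.2.1).getD tag 0 + 1),
    (st.1.2.2.2).insert tag (((st.1.2.2.2).getD tag PySem.Dict.empty).insert token
        (((st.1.2.2.2).getD tag PySem.Dict.empty).getD token 0 + 1))),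
   st.2 ++ [tag])

-- body of A's first outer loop: one linestring, building tag_line and appending it to tag_list
def pvA_line (st : PvS1 × List (List String)) (linestring : String) : PvS1 × List (List String) :=
  let words := (PySem.Str.split? linestring " ").getD []
  let r := words.foldl pvA_word (st.1, [])
  (r.1, st.2 ++ [r.2])

-- body of A's second pass's index loop over range(0, len(tag_line)-1)
def pvA_trans (tag_line : List String) (t : PvS2) (index : Int) : PvS2 :=
  let cur_tag := PySem.List.pyGetD tag_line index ""
  let next_tag := PySem.List.pyGetD tag_line (index + 1) ""
  let t := if index = 0 then
      (t.1.insert "START" (t.1.getD "START" 0 + 1),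
       t.2.insert "START" ((t.2.getD "START" PySem.Dict.empty).insert cur_tag
           ((t.2.getD "START" PySem.Dict.empty).getD cur_tag 0 + 1)))
    else t
  (t.1.insert cur_tag (t.1.getD cur_tag 0 + 1),
   t.2.insert cur_tag ((t.2.getD cur_tag PySem.Dict.empty).insert next_tag
       ((t.2.getD cur_tag PySem.Dict.empty).getD next_tag 0 + 1)))

-- body of A's second pass's outer loop: one tag_line
def pvA_transLine (t : PvS2) (tag_line : List String) : PvS2 :=
  (PySem.List.pyRange 0 ((tag_line.length : Int) - 1) 1).foldl (pvA_trans tag_line) t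

def get_vocab_tags (linestrings : List String) : List String × List String × (List (String × Int)) × (List (String × List (String × Int))) × (List (String × Int)) × (List (String × List (String × Int))) :=
  let p := linestrings.foldl pvA_line
      ((PySem.Set.empty, PySem.Set.empty, PySem.Dict.empty, PySem.Dict.empty), [])
  let q := p.2.foldl pvA_transLine (PySem.Dict.empty, PySem.Dict.empty)
  (p.1.1, p.1.2.1, p.1.2.2.1.items, p.1.2.2.2.items.map (fun kv => (kv.1, kv.2.items)),
   q.1.items, q.2.items.map (fun kv => (kv.1, kv.2.items)))

-- ===== PORT B =====
-- body of B's single word loop: state = (all six tables, prev tag (None before the first word), first-transition flag)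
def pvB_word (q : (PvS1 × PvS2) × Option String × Bool) (word : String) : (PvS1 × PvS2) × Option String × Bool :=
  let token := PySem.Str.slice word none (some (-3))
  let tag := PySem.Str.upper (PySem.Str.slice word (some (-2)) none)
  let s1 : PvS1 :=
    (PySem.Set.add q.1.1.1 token, PySem.Set.add q.1.1.2.1 tag,
     (q.1.1.2.2.1).insert tag ((q.1.1.2.2.1).getD tag 0 + 1),
     (q.1.1.2.2.2).insert tag (((q.1.1.2.2.2).getD tag PySem.Dict.empty).insert token
         (((q.1.1.2.2.2).getD tag PySem.Dict.empty).getD token 0 + 1)))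
  match q.2.1 with
  | none => ((s1, q.1.2), some tag, q.2.2)
  | some prev =>
    let tf : PvS2 × Bool :=
      if q.2.2 then
        ((q.1.2.1.insert "START" (q.1.2.1.getD "START" 0 + 1),
          q.1.2.2.insert "START" ((q.1.2.2.getD "START" PySem.Dict.empty).insert prev
              ((q.1.2.2.getD "START" PySem.Dict.empty).getD prev 0 + 1))), false)
      else (q.1.2, q.2.2)
    ((s1,
      (tf.1.1.insert prev (tf.1.1.getD prev 0 + 1),
       tf.1.2.insert prev ((tf.1.2.getD prev PySem.Dict.empty).insert tag
           ((tf.1.2.getD prev PySem.Dict.empty).getD tag 0 + 1)))),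
     some tag, tf.2)

-- body of B's outer loop: one linestring, prev/first reset
def pvB_line (st : PvS1 × PvS2) (linestring : String) : PvS1 × PvS2 :=
  ((((PySem.Str.split? linestring " ").getD []).foldl pvB_word (st, none, true))).1

def get_vocab_tags_alt (linestrings : List String) : List String × List String × (List (String × Int)) × (List (String × List (String × Int))) × (List (String × Int)) × (List (String × List (String × Int))) :=
  let st := linestrings.foldl pvB_line
      ((PySem.Set.empty, PySem.Set.empty, PySem.Dict.empty, PySem.Dict.empty),
       (PySem.Dict.empty, PySem.Dict.empty))
  (st.1.1, st.1.2.1, st.1.2.2.1.items, st.1.2.2.2.items.map (fun kv => (kv.1, kv.2.items)),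
   st.2.1.items, st.2.2.items.map (fun kv => (kv.1, kv.2.items)))

-- ===== PRECONDITION & SPEC =====
def Spec_get_vocab_tags (linestrings : List String) (out : List String × List String × (List (String × Int)) × (List (String × List (String × Int))) × (List (String × Int)) × (List (String × List (String × Int)))) : Prop := out = get_vocab_tags_alt linestrings
instance (linestrings : List String) (out : List String × List String × (List (String × Int)) × (List (String × List (String × Int))) × (List (String × Int)) × (List (String × List (String × Int)))) : Decidable (Spec_get_vocab_tags linestrings out) := by
  unfold Spec_get_vocab_tags
  exact @instDecidableEqProd _ _ _ (@instDecidableEqProd _ _ _ (@instDecidableEqProd _ _ _ (@instDecidableEqProd _ _ _ (@instDecidableEqProd _ _ _ inferInstance)))) out (get_vocab_tags_alt linestrings)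

-- ===== CLAIM (what is proved, stated in full; the proofs are below) =====
def Claim_equal_get_vocab_tags : Prop := ∀ (linestrings : List String), Dom_get_vocab_tags linestrings → Spec_get_vocab_tags linestrings (get_vocab_tags linestrings)

-- ===== LEMMAS AND PROOFS =====

-- the tag of one word, word[-2:].upper(), and the words of one line
def pvTag (word : String) : String := PySem.Str.upper (PySem.Str.slice word (some (-2)) none)
def pvWords (line : String) : List String := (PySem.Str.split? line " ").getD []
def pvTags (line : String) : List String := (pvWords line).map pvTag

-- pass-1 update of the four tables by one word
def pvU1 (s : PvS1) (word : String) : PvS1 := (pvA_word (s, []) word).1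

-- one transition update: tag_out_frequency[p] += 1; tag_tag_frequency[p][tag] += 1
def pvTstep (t : PvS2) (p tag : String) : PvS2 :=
  (t.1.insert p (t.1.getD p 0 + 1),
   t.2.insert p ((t.2.getD p PySem.Dict.empty).insert tag
       ((t.2.getD p PySem.Dict.empty).getD tag 0 + 1)))

-- the START update
def pvStart (t : PvS2) (p : String) : PvS2 :=
  (t.1.insert "START" (t.1.getD "START" 0 + 1),
   t.2.insert "START" ((t.2.getD "START" PySem.Dict.empty).insert p
       ((t.2.getD "START" PySem.Dict.empty).getD p 0 + 1)))

-- chain of transitions p → x₁ → x₂ → …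
def pvChain (p : String) : List String → PvS2 → PvS2
  | [], t => t
  | x :: xs, t => pvChain x xs (pvTstep t p x)

-- all transition updates one tag_line contributes
def pvTrans : List String → PvS2 → PvS2
  | [], t => t
  | [_], t => t
  | a :: b :: rest, t => pvChain a (b :: rest) (pvStart t a)

def pvLineU1 (s : PvS1) (line : String) : PvS1 := (pvWords line).foldl pvU1 s

theorem pvA_word_eq (s : PvS1) (acc : List String) (w : String) :
    pvA_word (s, acc) w = (pvU1 s w, acc ++ [pvTag w]) := by
  simp [pvA_word, pvU1, pvTag]

theorem pvA_inner (ws : List String) (s : PvS1) (acc : List String) :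
    ws.foldl pvA_word (s, acc) = (ws.foldl pvU1 s, acc ++ ws.map pvTag) := by
  induction ws generalizing s acc with
  | nil => simp
  | cons w rest ih => simp [List.foldl_cons, pvA_word_eq, ih]

theorem pvA_line_eq (s : PvS1) (tl : List (List String)) (line : String) :
    pvA_line (s, tl) line = (pvLineU1 s line, tl ++ [pvTags line]) := by
  simp only [pvA_line]
  rw [pvA_inner]
  simp only [List.nil_append, pvLineU1, pvWords, pvTags]

theorem pvA_pass1 (ls : List String) (s : PvS1) (tl : List (List String)) :
    ls.foldl pvA_line (s, tl) = (ls.foldl pvLineU1 s, tl ++ ls.map pvTags) := by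
  induction ls generalizing s tl with
  | nil => simp
  | cons l rest ih => simp [List.foldl_cons, pvA_line_eq, ih]

theorem pvA_trans_succ (a : String) (rest : List String) (t : PvS2) (i : Nat) :
    pvA_trans (a :: rest) t ((i : Int) + 1) =
      pvTstep t (rest.getD i "") (rest.getD (i + 1) "") := by
  have h0 : ((i : Int) + 1) ≠ 0 := by omega
  have h1 : ((i : Int) + 1) = ((i + 1 : Nat) : Int) := by push_cast; ring
  have h2 : (((i + 1 : Nat) : Int) + 1) = ((i + 1 + 1 : Nat) : Int) := by push_cast; ring
  rw [pvA_trans, if_neg h0]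
  simp only [h1, h2, PySem.List.pyGetD_natCast, pvTstep, List.getD_cons_succ]

theorem pvRange_chain (rs : List String) (b : String) (t : PvS2) :
    (List.range rs.length).foldl
        (fun t i => pvTstep t ((b :: rs).getD i "") ((b :: rs).getD (i + 1) "")) t
      = pvChain b rs t := by
  induction rs generalizing b t with
  | nil => rfl
  | cons c cs ih =>
    simp only [List.length_cons, List.range_succ_eq_map, List.foldl_cons, List.foldl_map]
    simp only [List.getD_cons_zero, List.getD_cons_succ, Nat.succ_eq_add_one]
    exact ih c (pvTstep t b c)

theorem pvA_transLine_eq (l : List String) (t : PvS2) :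
    pvA_transLine t l = pvTrans l t := by
  match l with
  | [] => rfl
  | [a] => rfl
  | a :: b :: rs =>
    have hlen : ((a :: b :: rs).length : Int) - 1 = ((rs.length + 1 : Nat) : Int) := by
      simp
    rw [pvA_transLine, hlen, PySem.List.pyRange_zero_natCast, List.foldl_map]
    simp only [List.range_succ_eq_map, List.foldl_cons, List.foldl_map]
    have h0 : pvA_trans (a :: b :: rs) t ((0 : Nat) : Int) =
        pvTstep (pvStart t a) a b := by
      simp only [Nat.cast_zero, pvA_trans, zero_add,
        PySem.List.pyGetD_zero_cons, PySem.List.pyGetD_ofNat' (a :: b :: rs) 1 ""]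
      rfl
    rw [h0]
    have hbody : ∀ (t' : PvS2) (i : Nat),
        pvA_trans (a :: b :: rs) t' ((Nat.succ i : Nat) : Int) =
          pvTstep t' ((b :: rs).getD i "") ((b :: rs).getD (i + 1) "") := by
      intro t' i
      have : ((Nat.succ i : Nat) : Int) = ((i : Int) + 1) := by push_cast; ring
      rw [this, pvA_trans_succ]
    calc (List.range rs.length).foldl
            (fun t' i => pvA_trans (a :: b :: rs) t' ((Nat.succ i : Nat) : Int))
            (pvTstep (pvStart t a) a b)
        = (List.range rs.length).foldl
            (fun t' i => pvTstep t' ((b :: rs).getD i "") ((b :: rs).getD (i + 1) ""))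
            (pvTstep (pvStart t a) a b) := by
          exact PySem.List.foldl_congr_mem _ _ _ _ (fun t' i _ => hbody t' i)
      _ = pvChain b rs (pvTstep (pvStart t a) a b) := pvRange_chain rs b _
      _ = pvTrans (a :: b :: rs) t := rfl

theorem pvB_word_none (s1 : PvS1) (s2 : PvS2) (f : Bool) (w : String) :
    pvB_word ((s1, s2), none, f) w = ((pvU1 s1 w, s2), some (pvTag w), f) := rfl

theorem pvB_word_false (s1 : PvS1) (s2 : PvS2) (p w : String) :
    pvB_word ((s1, s2), some p, false) w =
      ((pvU1 s1 w, pvTstep s2 p (pvTag w)), some (pvTag w), false) := by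
  simp [pvB_word, pvU1, pvA_word, pvTag, pvTstep]

theorem pvB_word_true (s1 : PvS1) (s2 : PvS2) (p w : String) :
    pvB_word ((s1, s2), some p, true) w =
      ((pvU1 s1 w, pvTstep (pvStart s2 p) p (pvTag w)), some (pvTag w), false) := by
  simp [pvB_word, pvU1, pvA_word, pvTag, pvTstep, pvStart]

theorem pvB_rest (ws : List String) (s1 : PvS1) (s2 : PvS2) (p : String) :
    ws.foldl pvB_word ((s1, s2), some p, false) =
      ((ws.foldl pvU1 s1, pvChain p (ws.map pvTag) s2),
       some ((ws.map pvTag).getLastD p), false) := by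
  induction ws generalizing s1 s2 p with
  | nil => simp [pvChain]
  | cons w rest ih =>
    simp only [List.foldl_cons, pvB_word_false, ih, List.map_cons, List.getLastD_cons, pvChain]

theorem pvB_first (ws : List String) (s1 : PvS1) (s2 : PvS2) (p : String) :
    (ws.foldl pvB_word ((s1, s2), some p, true)).1 =
      (ws.foldl pvU1 s1, pvTrans (p :: ws.map pvTag) s2) := by
  match ws with
  | [] => rfl
  | w :: rest =>
    simp only [List.foldl_cons, pvB_word_true, pvB_rest, List.map_cons, pvTrans, pvChain]

theorem pvB_line_eq (s1 : PvS1) (s2 : PvS2) (line : String) :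
    pvB_line (s1, s2) line = (pvLineU1 s1 line, pvTrans (pvTags line) s2) := by
  rw [pvB_line]
  show ((pvWords line).foldl pvB_word ((s1, s2), none, true)).1 = _
  match h : pvWords line with
  | [] => simp [pvLineU1, pvTags, h, pvTrans]
  | w :: rest =>
    simp only [List.foldl_cons, pvB_word_none, pvB_first, pvLineU1, pvTags, h,
      List.map_cons, List.foldl_cons]

theorem pvB_outer (ls : List String) (s1 : PvS1) (s2 : PvS2) :
    ls.foldl pvB_line (s1, s2) =
      (ls.foldl pvLineU1 s1, ls.foldl (fun t line => pvTrans (pvTags line) t) s2) := by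
  induction ls generalizing s1 s2 with
  | nil => rfl
  | cons l rest ih => simp only [List.foldl_cons, pvB_line_eq, ih]

-- ===== VERDICT (by name: the statement is the Claim_ definition above) =====
theorem get_vocab_tags_spec : Claim_equal_get_vocab_tags := by
  intro ls _
  show get_vocab_tags ls = get_vocab_tags_alt ls
  rw [get_vocab_tags, get_vocab_tags_alt]
  rw [pvA_pass1, pvB_outer]
  simp only [List.nil_append, List.foldl_map]
  have : ∀ (t : PvS2),
      ls.foldl (fun t line => pvA_transLine t (pvTags line)) t =
        ls.foldl (fun t line => pvTrans (pvTags line) t) t := by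
    intro t
    exact PySem.List.foldl_congr_mem _ _ _ _
      (fun t' line _ => pvA_transLine_eq (pvTags line) t')
  rw [this]
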